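-- pv_equiv track=rewrite | github.com/JulyHarry/PythonNoob | LeetCode/leetcode/editor/cn/LC02616_MinimizeTheMaximumDifferenceOfPairs.py | minimizeMax
-- ===== SOURCE A (Python) =====
-- from typing import List
--
-- def minimizeMax(nums: List[int], p: int) -> int:
--     nums.sort()
--
--     def check(m):
--         i, cnt = 0, 0
--         while i < len(nums) - 1:
--             if nums[i + 1] - nums[i] <= m:
--                 cnt += 1
--                 i += 2
--             else:
--                 i += 1
--         return cnt >= p
--
--     l, r = 0, nums[-1] - nums[0]
--     while l < r:
--         m = (l + r) // 2
--         if check(m):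
--             r = m
--         else:
--             l = m + 1
--     return l
-- ===== SOURCE B (Python) =====
-- # Candidate-scan strategy: the answer is always one of the adjacent gaps of the
-- # sorted array (or the full range when p pairs do not fit), so enumerate the
-- # sorted gap values and return the first one admitting p greedy pairs.
-- # Mutates nums in place by sorting it, same as the original.
-- def minimizeMax(nums, p):
--     nums.sort()
--     if p <= 0:
--         return 0
--
--     def pairs(m):
--         # number of disjoint adjacent pairs with difference <= m (greedy),
--         # via a single pass over the gaps with a "previous element free" flag
--         cnt = 0
--         free = True
--         for g in (b - a for a, b in zip(nums, nums[1:])):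
--             if free and g <= m:
--                 cnt += 1
--                 free = False
--             else:
--                 free = True
--         return cnt
--
--     for g in sorted(b - a for a, b in zip(nums, nums[1:])):
--         if pairs(g) >= p:
--             return g
--     return nums[-1] - nums[0]
-- ===== Notes on version B (the rewrite author's own statement) =====
-- stated objective: alternative
-- what changed: Replaces the binary search over the value range (with an index-pointer greedy check) by a scan of the sorted adjacent-gap values of the sorted array -- the answer is always such a gap (or the full range when p pairs do not fit) -- with the greedy pair count computed in one flag-carrying pass over the gaps.
import Mathlib
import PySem

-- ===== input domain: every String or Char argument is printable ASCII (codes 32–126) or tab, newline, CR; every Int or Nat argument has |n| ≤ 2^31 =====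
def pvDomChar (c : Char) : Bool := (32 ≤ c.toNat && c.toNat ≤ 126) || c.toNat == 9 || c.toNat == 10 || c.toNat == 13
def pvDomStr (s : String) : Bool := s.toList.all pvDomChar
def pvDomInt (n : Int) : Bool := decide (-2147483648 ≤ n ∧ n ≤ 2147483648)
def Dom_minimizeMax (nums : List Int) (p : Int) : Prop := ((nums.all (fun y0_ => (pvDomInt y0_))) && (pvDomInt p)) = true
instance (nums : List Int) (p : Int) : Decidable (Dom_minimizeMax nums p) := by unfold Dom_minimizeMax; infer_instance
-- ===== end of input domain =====

-- B replaces A's binary search over the value range by a scan of the sorted adjacent-gap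
-- candidates (alternative decomposition, same return values); both sort nums in place in
-- Python — the equivalence proved here is about the return value.

-- ===== PORT A =====
-- the 'while i < len(nums) - 1' greedy loop of check(m); returns the final cnt
def aCheckLoop (s : List Int) (m i cnt : Int) : Int :=
  if _h : i < (s.length : Int) - 1 then
    if PySem.List.pyGetD s (i + 1) 0 - PySem.List.pyGetD s i 0 ≤ m then
      aCheckLoop s m (i + 2) (cnt + 1)
    else
      aCheckLoop s m (i + 1) cnt
  else cnt
termination_by ((s.length : Int) - i).toNat
decreasing_by all_goals omega

def aCheck (s : List Int) (p m : Int) : Bool := decide (aCheckLoop s m 0 0 ≥ p)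

-- the 'while l < r' binary search
def aBS (s : List Int) (p l r : Int) : Int :=
  if _h : l < r then
    let m := PySem.Int.floordiv (l + r) 2
    if aCheck s p m then aBS s p l m else aBS s p (m + 1) r
  else l
termination_by (r - l).toNat
decreasing_by
  all_goals
    have h1 : l ≤ PySem.Int.floordiv (l + r) 2 :=
      (PySem.Int.le_floordiv_iff_mul_le (by omega)).mpr (by omega)
    have h2 : PySem.Int.floordiv (l + r) 2 < r :=
      (PySem.Int.floordiv_lt_iff_lt_mul (by omega)).mpr (by omega)
    omega

def minimizeMax (nums : List Int) (p : Int) : Int :=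
  let s := PySem.List.sorted nums (fun x => x) false
  -- nums[-1] - nums[0]; IndexError on [] excluded by Pre_
  aBS s p 0 (PySem.List.pyGetD s (-1) 0 - PySem.List.pyGetD s 0 0)

-- ===== PORT B =====
-- (b - a for a, b in zip(nums, nums[1:]))
def bGaps (s : List Int) : List Int := List.zipWith (fun a b => b - a) s s.tail

-- pairs(m): one pass over the gaps with a (cnt, free) state
def bPairs (s : List Int) (m : Int) : Int :=
  ((bGaps s).foldl
    (fun st g => if st.2 && decide (g ≤ m) then (st.1 + 1, false) else (st.1, true))
    ((0 : Int), true)).1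

-- 'for g in sorted(gaps): if pairs(g) >= p: return g' with the final fallback d
def bFind (s : List Int) (p d : Int) : List Int → Int
  | [] => d
  | g :: rest => if bPairs s g ≥ p then g else bFind s p d rest

def minimizeMax_alt (nums : List Int) (p : Int) : Int :=
  let s := PySem.List.sorted nums (fun x => x) false
  if p ≤ 0 then 0
  else
    bFind s p (PySem.List.pyGetD s (-1) 0 - PySem.List.pyGetD s 0 0)
      (PySem.List.sorted (bGaps s) (fun x => x) false)

-- ===== PRECONDITION & SPEC =====
-- A evaluates nums[-1] and so raises IndexError on the empty list; Pre_ excludes it.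
def Pre_minimizeMax (nums : List Int) (p : Int) : Prop := nums ≠ []
instance (nums : List Int) (p : Int) : Decidable (Pre_minimizeMax nums p) := by
  unfold Pre_minimizeMax; infer_instance
def pvWitness_minimizeMax : List Int × Int := ([10, 1, 2, 7, 1, 3], 2)

def Spec_minimizeMax (nums : List Int) (p : Int) (out : Int) : Prop := out = minimizeMax_alt nums p
instance (nums : List Int) (p : Int) (out : Int) : Decidable (Spec_minimizeMax nums p out) := by
  unfold Spec_minimizeMax; infer_instance

-- ===== CLAIM (what is proved, stated in full; the proofs are below) =====
def Claim_equal_minimizeMax : Prop := ∀ (nums : List Int) (p : Int), Dom_minimizeMax nums p → Pre_minimizeMax nums p → Spec_minimizeMax nums p (minimizeMax nums p)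

-- ===== LEMMAS AND PROOFS =====

def cntPairs (m : Int) : List Int → Int
  | x :: y :: r => if y - x ≤ m then 1 + cntPairs m r else cntPairs m (y :: r)
  | _ => 0

theorem cnt_cons₂ (m x y : Int) (r : List Int) :
    cntPairs m (x :: y :: r) = if y - x ≤ m then 1 + cntPairs m r else cntPairs m (y :: r) := rfl

theorem cnt_nonneg (m : Int) (xs : List Int) : 0 ≤ cntPairs m xs := by
  induction hn : xs.length using Nat.strong_induction_on generalizing xs with
  | _ n ih =>
  match xs with
  | [] => simp [cntPairs]
  | [x] => simp [cntPairs]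
  | x :: y :: r =>
    have h1 := ih r.length (by simp [← hn]) r rfl
    have h2 := ih (r.length + 1) (by simp [← hn]) (y :: r) (by simp)
    rw [cnt_cons₂]; split_ifs <;> omega

theorem gaps_tail_subset {g x : Int} {r : List Int} (h : g ∈ bGaps r) : g ∈ bGaps (x :: r) := by
  match r with
  | [] => simp [bGaps] at h
  | y :: r' => exact List.mem_cons_of_mem _ h

theorem cnt_tail_le (m : Int) : ∀ (x : Int) (r : List Int), cntPairs m r ≤ cntPairs m (x :: r) := by
  intro x r
  induction hn : r.length using Nat.strong_induction_on generalizing x r with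
  | _ n ih =>
  match r with
  | [] => simp [cntPairs]
  | [y] => simpa [cntPairs] using cnt_nonneg m [x, y]
  | y :: z :: r' =>
    have hr' : cntPairs m r' ≤ cntPairs m (z :: r') :=
      ih r'.length (by simp [← hn]) z r' rfl
    have h0 := cnt_nonneg m (z :: r')
    rw [cnt_cons₂, cnt_cons₂ m x y (z :: r'), cnt_cons₂] ; split_ifs <;> omega

theorem cnt_cons_le (m : Int) (x : Int) (r : List Int) : cntPairs m (x :: r) ≤ 1 + cntPairs m r := by
  match r with
  | [] => simp [cntPairs]
  | z :: r' =>
    have := cnt_tail_le m z r'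
    rw [cnt_cons₂]; split_ifs <;> omega

theorem cnt_mono {m m' : Int} (h : m ≤ m') (xs : List Int) : cntPairs m xs ≤ cntPairs m' xs := by
  induction hn : xs.length using Nat.strong_induction_on generalizing xs with
  | _ n ih =>
  match xs with
  | [] => simp [cntPairs]
  | [x] => simp [cntPairs]
  | x :: y :: r =>
    have ihr : cntPairs m r ≤ cntPairs m' r := ih r.length (by simp [← hn]) r rfl
    have ihyr : cntPairs m (y :: r) ≤ cntPairs m' (y :: r) :=
      ih (r.length + 1) (by simp [← hn]) (y :: r) (by simp)
    have hc := cnt_cons_le m' y r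
    rw [cnt_cons₂, cnt_cons₂]; split_ifs <;> omega

theorem cnt_congr {m m' : Int} (xs : List Int)
    (hg : ∀ g ∈ bGaps xs, (g ≤ m ↔ g ≤ m')) : cntPairs m xs = cntPairs m' xs := by
  induction hn : xs.length using Nat.strong_induction_on generalizing xs with
  | _ n ih =>
  match xs with
  | [] => simp [cntPairs]
  | [x] => simp [cntPairs]
  | x :: y :: r =>
    have hgr : ∀ g ∈ bGaps (y :: r), (g ≤ m ↔ g ≤ m') := fun g hgm =>
      hg g (gaps_tail_subset hgm)
    have hgr' : ∀ g ∈ bGaps r, (g ≤ m ↔ g ≤ m') := fun g hgm =>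
      hgr g (gaps_tail_subset hgm)
    have hx : (y - x ≤ m ↔ y - x ≤ m') := hg (y - x) (by simp [bGaps])
    have ihr := ih r.length (by simp [← hn]) r hgr' rfl
    have ihyr := ih (r.length + 1) (by simp [← hn]) (y :: r) hgr (by simp)
    rw [cnt_cons₂, cnt_cons₂]; split_ifs with a b b <;> omega

theorem cnt_pos_gap {m : Int} (xs : List Int) (h : 1 ≤ cntPairs m xs) :
    ∃ g ∈ bGaps xs, g ≤ m := by
  induction hn : xs.length using Nat.strong_induction_on generalizing xs with
  | _ n ih =>
  match xs with
  | [] => simp [cntPairs] at h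
  | [x] => simp [cntPairs] at h
  | x :: y :: r =>
    by_cases h1 : y - x ≤ m
    · exact ⟨y - x, by simp [bGaps], h1⟩
    · rw [cnt_cons₂, if_neg h1] at h
      obtain ⟨g, hg, hgm⟩ := ih (r.length + 1) (by simp [← hn]) (y :: r) h (by simp)
      exact ⟨g, gaps_tail_subset hg, hgm⟩

theorem mem_gaps_exists {g : Int} (s : List Int) (h : g ∈ bGaps s) :
    ∃ a b, a ∈ s ∧ b ∈ s ∧ g = b - a := by
  induction hn : s.length using Nat.strong_induction_on generalizing s with
  | _ n ih =>
  match s with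
  | [] => simp [bGaps] at h
  | [x] => simp [bGaps] at h
  | x :: y :: r =>
    rcases List.mem_cons.mp h with h' | h'
    · exact ⟨x, y, by simp, by simp, by omega⟩
    · obtain ⟨a, b, ha, hb, he⟩ := ih (r.length + 1) (by simp [← hn]) (y :: r) h' (by simp)
      exact ⟨a, b, List.mem_cons_of_mem _ ha, List.mem_cons_of_mem _ hb, he⟩

theorem bridge_B_aux (m : Int) (xs : List Int) : ∀ c : Int,
    ((bGaps xs).foldl
      (fun st g => if st.2 && decide (g ≤ m) then (st.1 + 1, false) else (st.1, true))
      (c, true)).1 = c + cntPairs m xs := by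
  induction hn : xs.length using Nat.strong_induction_on generalizing xs with
  | _ n ih =>
  intro c
  match xs with
  | [] => simp [bGaps, cntPairs]
  | [x] => simp [bGaps, cntPairs]
  | x :: y :: r =>
    rw [show bGaps (x :: y :: r) = (y - x) :: bGaps (y :: r) from rfl, List.foldl_cons,
        cnt_cons₂]
    by_cases h1 : y - x ≤ m
    · rw [if_pos h1]
      have e1 : (if (true && decide (y - x ≤ m) : Bool) then (c + 1, false) else (c, true))
          = ((c + 1 : Int), false) := by simp [h1]
      rw [e1]
      match r with
      | [] => simp [bGaps, cntPairs]
      | z :: r' =>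
        rw [show bGaps (y :: z :: r') = (z - y) :: bGaps (z :: r') from rfl, List.foldl_cons]
        have e2 : (if (false && decide (z - y ≤ m) : Bool) then (c + 1 + 1, false)
            else (c + 1, true)) = ((c + 1 : Int), true) := by simp
        rw [e2, ih (r'.length + 1) (by simp [← hn]) (z :: r') (by simp) (c + 1)]
        omega
    · rw [if_neg h1]
      have e1 : (if (true && decide (y - x ≤ m) : Bool) then (c + 1, false) else (c, true))
          = ((c : Int), true) := by simp [h1]
      rw [e1]
      exact ih (r.length + 1) (by simp [← hn]) (y :: r) (by simp) c

theorem bridge_B (s : List Int) (m : Int) : bPairs s m = cntPairs m s := by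
  show ((bGaps s).foldl _ ((0 : Int), true)).1 = cntPairs m s
  rw [bridge_B_aux]; omega

theorem cnt_short (m : Int) (xs : List Int) (h : xs.length ≤ 1) : cntPairs m xs = 0 := by
  match xs with
  | [] => rfl
  | [x] => rfl

theorem bridge_A (s : List Int) (m : Int) : ∀ i cnt : Int, 0 ≤ i →
    aCheckLoop s m i cnt = cnt + cntPairs m (s.drop i.toNat) := by
  intro i cnt h0
  induction hn : ((s.length : Int) - i).toNat using Nat.strong_induction_on
    generalizing i cnt with
  | _ n ih =>
  by_cases hlt : i < (s.length : Int) - 1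
  · have hi1 : i.toNat < s.length := by omega
    have hi2 : i.toNat + 1 < s.length := by omega
    have hd : s.drop i.toNat = s[i.toNat] :: s[i.toNat + 1] :: s.drop (i.toNat + 2) := by
      rw [List.drop_eq_getElem_cons hi1, List.drop_eq_getElem_cons hi2]
    have hg0 : PySem.List.pyGetD s i 0 = s[i.toNat] :=
      PySem.List.pyGetD_eq_getElem s 0 h0 (by omega)
    have hg1 : PySem.List.pyGetD s (i + 1) 0 = s[i.toNat + 1] := by
      rw [PySem.List.pyGetD_eq_getElem s 0 (by omega) (by omega)]
      congr 1; omega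
    rw [aCheckLoop, dif_pos hlt, hg0, hg1, hd, cnt_cons₂]
    by_cases hc : s[i.toNat + 1] - s[i.toNat] ≤ m
    · rw [if_pos hc, if_pos hc,
        ih ((s.length : Int) - (i + 2)).toNat (by omega) (i + 2) (cnt + 1) (by omega) rfl]
      have : (i + 2).toNat = i.toNat + 2 := by omega
      rw [this]; omega
    · rw [if_neg hc, if_neg hc,
        ih ((s.length : Int) - (i + 1)).toNat (by omega) (i + 1) cnt (by omega) rfl]
      have : (i + 1).toNat = i.toNat + 1 := by omega
      rw [this, List.drop_eq_getElem_cons hi2]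
  · rw [aCheckLoop, dif_neg hlt, cnt_short m _ (by simp; omega)]
    omega

theorem aCheck_eq (s : List Int) (p m : Int) :
    aCheck s p m = decide (p ≤ cntPairs m s) := by
  rw [aCheck, bridge_A s m 0 0 le_rfl]
  simp [ge_iff_le]

theorem aCheck_mono (s : List Int) (p : Int) {m m' : Int} (h : m ≤ m')
    (hm : aCheck s p m = true) : aCheck s p m' = true := by
  rw [aCheck_eq] at hm ⊢
  have := cnt_mono h s
  simp at hm ⊢
  omega

theorem bs_eq (s : List Int) (p : Int) : ∀ l r μ : Int, l ≤ μ → μ ≤ r →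
    (∀ m, l ≤ m → m < μ → aCheck s p m = false) →
    (μ < r → aCheck s p μ = true) →
    aBS s p l r = μ := by
  intro l r
  induction hn : (r - l).toNat using Nat.strong_induction_on generalizing l r with
  | _ n ih =>
  intro μ h1 h2 hbelow hat
  by_cases hlt : l < r
  · have hm1 : l ≤ PySem.Int.floordiv (l + r) 2 :=
      (PySem.Int.le_floordiv_iff_mul_le (by omega)).mpr (by omega)
    have hm2 : PySem.Int.floordiv (l + r) 2 < r :=
      (PySem.Int.floordiv_lt_iff_lt_mul (by omega)).mpr (by omega)
    set mid := PySem.Int.floordiv (l + r) 2 with hmid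
    rw [aBS, dif_pos hlt]
    by_cases hc : aCheck s p mid = true
    · rw [if_pos hc]
      have hμmid : μ ≤ mid := by
        by_contra hgt
        rw [hbelow mid hm1 (by omega)] at hc; exact Bool.false_ne_true hc
      exact ih (mid - l).toNat (by omega) l mid rfl μ h1 hμmid hbelow
        (fun h => hat (by omega))
    · rw [if_neg hc]
      have hμmid : mid < μ := by
        by_contra hle
        exact hc (aCheck_mono s p (by omega) (hat (by omega)))
      exact ih (r - (mid + 1)).toNat (by omega) (mid + 1) r rfl μ (by omega) h2
        (fun m hm hm' => hbelow m (by omega) hm') hat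
  · rw [aBS, dif_neg hlt]; omega

theorem bFind_default (s : List Int) (p d : Int) : ∀ G : List Int,
    (∀ g ∈ G, ¬ bPairs s g ≥ p) → bFind s p d G = d := by
  intro G
  induction G with
  | nil => intro _; rfl
  | cons g rest ihr =>
    intro h
    rw [bFind, if_neg (h g (by simp))]
    exact ihr fun g' hg' => h g' (List.mem_cons_of_mem _ hg')

theorem bFind_found (s : List Int) (p d : Int) : ∀ G : List Int,
    G.Pairwise (· ≤ ·) → ∀ g₀ ∈ G, bPairs s g₀ ≥ p →
    bFind s p d G ∈ G ∧ bPairs s (bFind s p d G) ≥ p ∧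
      ∀ g ∈ G, bPairs s g ≥ p → bFind s p d G ≤ g := by
  intro G
  induction G with
  | nil => intro _ g₀ hg₀; simp at hg₀
  | cons g rest ihr =>
    intro hpw g₀ hg₀ hok
    by_cases hc : bPairs s g ≥ p
    · rw [bFind, if_pos hc]
      refine ⟨by simp, hc, ?_⟩
      intro g' hg' _
      rcases List.mem_cons.mp hg' with rfl | hg'
      · exact le_rfl
      · exact (List.pairwise_cons.mp hpw).1 g' hg'
    · rw [bFind, if_neg hc]
      have hg₀' : g₀ ∈ rest := by
        rcases List.mem_cons.mp hg₀ with rfl | h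
        · exact absurd hok hc
        · exact h
      obtain ⟨ha, hb, hcm⟩ := ihr (List.pairwise_cons.mp hpw).2 g₀ hg₀' hok
      exact ⟨List.mem_cons_of_mem _ ha, hb, fun g' hg' hok' => by
        rcases List.mem_cons.mp hg' with rfl | hg'
        · exact absurd hok' hc
        · exact hcm g' hg' hok'⟩

-- sorted-list order facts
theorem mem_le_getLast {s : List Int} (hpw : s.Pairwise (fun a b => a ≤ b)) (h : s ≠ [])
    {b : Int} (hb : b ∈ s) : b ≤ s.getLast h := by
  induction s with
  | nil => simp at hb
  | cons x t iht =>
    match t with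
    | [] => simp at hb; simp [hb, List.getLast]
    | y :: t' =>
      rw [List.getLast_cons (by simp)]
      rcases List.mem_cons.mp hb with rfl | hb'
      · exact le_trans ((List.pairwise_cons.mp hpw).1 _ (List.getLast_mem _))
          le_rfl
      · exact iht (List.pairwise_cons.mp hpw).2 (by simp) hb'

theorem head_le_mem {s : List Int} (hpw : s.Pairwise (fun a b => a ≤ b)) (h : s ≠ [])
    {a : Int} (ha : a ∈ s) : s.head h ≤ a := by
  match s with
  | x :: t =>
    rcases List.mem_cons.mp ha with rfl | ha'
    · exact le_rfl
    · exact (List.pairwise_cons.mp hpw).1 a ha'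

theorem gaps_nonneg {s : List Int} (hpw : s.Pairwise (fun a b => a ≤ b)) :
    ∀ g ∈ bGaps s, 0 ≤ g := by
  induction s with
  | nil => simp [bGaps]
  | cons x t iht =>
    intro g hg
    match t with
    | [] => simp [bGaps] at hg
    | y :: t' =>
      rcases List.mem_cons.mp hg with rfl | hg'
      · have h1 := (List.pairwise_cons.mp hpw).1 y (by simp)
        show (0 : Int) ≤ y - x
        omega
      · exact iht (List.pairwise_cons.mp hpw).2 g hg'

theorem check_to_gap (s : List Int) (p m : Int) (hp : 1 ≤ p) (hc : aCheck s p m = true) :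
    ∃ g ∈ bGaps s, g ≤ m ∧ p ≤ bPairs s g := by
  rw [aCheck_eq] at hc
  simp only [decide_eq_true_eq] at hc
  obtain ⟨g₀, hg₀, hg₀m⟩ := cnt_pos_gap (m := m) s (by omega)
  have hF : g₀ ∈ (bGaps s).filter (fun g => decide (g ≤ m)) :=
    List.mem_filter.mpr ⟨hg₀, by simpa using hg₀m⟩
  obtain ⟨a, ha⟩ : ∃ a, ((bGaps s).filter (fun g => decide (g ≤ m))).max? = some a := by
    match e : ((bGaps s).filter (fun g => decide (g ≤ m))).max? with
    | some a => exact ⟨a, rfl⟩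
    | none => rw [List.max?_eq_none_iff.mp e] at hF; simp at hF
  obtain ⟨haF, hamax⟩ := List.max?_eq_some_iff.mp ha
  have hags : a ∈ bGaps s := (List.mem_filter.mp haF).1
  have ham : a ≤ m := by simpa using (List.mem_filter.mp haF).2
  refine ⟨a, hags, ham, ?_⟩
  rw [bridge_B]
  rw [cnt_congr s (m := a) (m' := m) ?_]
  · exact hc
  · intro g hg
    constructor
    · intro h; omega
    · intro h
      exact hamax g (List.mem_filter.mpr ⟨hg, by simpa using h⟩)

theorem main_equiv (nums : List Int) (p : Int) (hne : nums ≠ []) :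
    minimizeMax nums p = minimizeMax_alt nums p := by
  simp only [minimizeMax, minimizeMax_alt]
  set s := PySem.List.sorted nums (fun x => x) false with hs
  have hsne : s ≠ [] := by
    intro h
    have := PySem.List.length_sorted nums (fun x => x) false
    rw [← hs, h] at this
    exact hne (List.length_eq_zero_iff.mp this.symm)
  have hpw : s.Pairwise (fun a b => a ≤ b) := by
    simpa using PySem.List.sorted_pairwise nums (fun x => x)
  set D := PySem.List.pyGetD s (-1) 0 - PySem.List.pyGetD s 0 0 with hD
  have hDl : PySem.List.pyGetD s (-1) 0 = s.getLast hsne := PySem.List.pyGetD_neg_one s 0 hsne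
  have hDh : PySem.List.pyGetD s 0 0 = s.head hsne := by
    rw [PySem.List.pyGetD_zero]
    match s, hsne with
    | x :: t, _ => rfl
  have hD0 : 0 ≤ D := by
    have := head_le_mem hpw hsne (List.getLast_mem hsne)
    rw [hD, hDl, hDh]; omega
  have hgapD : ∀ g ∈ bGaps s, g ≤ D := by
    intro g hg
    obtain ⟨a, b, ha, hb, he⟩ := mem_gaps_exists s hg
    have h1 := head_le_mem hpw hsne ha
    have h2 := mem_le_getLast hpw hsne hb
    rw [hD, hDl, hDh]; omega
  have hgap0 := gaps_nonneg hpw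
  by_cases hp : p ≤ 0
  · rw [if_pos hp]
    apply bs_eq s p 0 D 0 le_rfl hD0
    · intro m h1 h2; exact absurd h2 (by omega)
    · intro _
      rw [aCheck_eq]
      have := cnt_nonneg 0 s
      simp only [decide_eq_true_eq]
      omega
  · rw [if_neg hp]
    have hp1 : 1 ≤ p := by omega
    set G := PySem.List.sorted (bGaps s) (fun x => x) false with hG
    have hGpw : G.Pairwise (fun a b => a ≤ b) := by
      simpa using PySem.List.sorted_pairwise (bGaps s) (fun x => x)
    have hGm : ∀ g, g ∈ G ↔ g ∈ bGaps s := by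
      intro g; rw [hG]; exact PySem.List.mem_sorted (bGaps s) (fun x => x) false g
    by_cases hex : ∃ g ∈ G, p ≤ bPairs s g
    · obtain ⟨g₀, hg₀, hok⟩ := hex
      obtain ⟨hmem, hok2, hmin⟩ := bFind_found s p D G hGpw g₀ hg₀ hok
      apply bs_eq s p 0 D (bFind s p D G) (hgap0 _ ((hGm _).mp hmem)) (hgapD _ ((hGm _).mp hmem))
      · intro m h0m hmμ
        by_contra hcne
        have hctrue : aCheck s p m = true := by
          rcases Bool.eq_false_or_eq_true (aCheck s p m) with h | h
          · exact h
          · exact absurd h hcne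
        obtain ⟨g', hg', hg'm, hg'ok⟩ := check_to_gap s p m hp1 hctrue
        have := hmin g' ((hGm g').mpr hg') hg'ok
        omega
      · intro _
        rw [aCheck_eq, ← bridge_B]
        simpa using hok2
    · rw [bFind_default s p D G (fun g hg hok => hex ⟨g, hg, hok⟩)]
      apply bs_eq s p 0 D D hD0 le_rfl
      · intro m h0m hmD
        by_contra hcne
        have hctrue : aCheck s p m = true := by
          rcases Bool.eq_false_or_eq_true (aCheck s p m) with h | h
          · exact h
          · exact absurd h hcne
        obtain ⟨g', hg', hg'm, hg'ok⟩ := check_to_gap s p m hp1 hctrue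
        exact hex ⟨g', (hGm g').mpr hg', hg'ok⟩
      · intro h; exact absurd h (lt_irrefl D)

-- ===== VERDICT (by name: the statement is the Claim_ definition above) =====
theorem minimizeMax_spec : Claim_equal_minimizeMax := by
  intro nums p _ hpre
  unfold Spec_minimizeMax
  exact main_equiv nums p hpre
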